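-- pv_equiv track=rewrite | github.com/LookoutLambe/Tusitusiga_Paia | hebrew_cross_ref_v2.py | words_semantically_related
-- ===== SOURCE A (Python) =====
-- SYNONYM_GROUPS = [
--     {'trust', 'trusting', 'trusted', 'confident', 'confidence', 'secure', 'security', 'rely', 'safe', 'faith', 'believe'},
--     {'fear', 'afraid', 'dread', 'terror', 'frightened', 'scared', 'reverence', 'awe'},
--     {'holy', 'sacred', 'hallowed', 'sanctified', 'consecrated', 'holiness', 'sanctity'},
--     {'covenant', 'agreement', 'pact', 'treaty', 'bond'},
--     {'soul', 'spirit', 'life force', 'being'},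
--     {'righteous', 'righteousness', 'just', 'upright', 'justice', 'justifying'},
--     {'wicked', 'wickedness', 'evil', 'ungodly', 'sinful', 'iniquity', 'unrighteous', 'unrighteousness'},
--     {'mercy', 'compassion', 'lovingkindness', 'kindness', 'grace', 'loyal love'},
--     {'glory', 'honor', 'splendor', 'majesty'},
--     {'pride', 'arrogance', 'haughtiness', 'swelling', 'thicket', 'jungle'},
--     {'beautiful', 'lovely', 'fair', 'pleasant'},
--     {'redeem', 'ransom', 'deliver', 'rescue', 'save'},
--     {'atone', 'atonement', 'cover', 'reconcile', 'expiate'},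
--     {'sacrifice', 'offering', 'slaughter'},
--     {'worship', 'bow', 'prostrate', 'adore'},
--     {'repent', 'turn', 'return', 'convert'},
--     {'sin', 'transgression', 'iniquity', 'trespass', 'guilt'},
--     {'prophet', 'seer', 'spokesman'},
--     {'priest', 'minister'},
--     {'anoint', 'consecrate', 'dedicate'},
--     {'temple', 'sanctuary', 'palace'},
--     {'tabernacle', 'dwelling', 'tent'},
--     {'judgment', 'justice', 'ordinance', 'decree'},
--     {'law', 'instruction', 'teaching', 'torah', 'commandment'},
--     {'word', 'saying', 'matter', 'thing', 'command'},
--     {'destroy', 'annihilate', 'devastate', 'ruin', 'perish'},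
--     {'create', 'make', 'form', 'fashion'},
--     {'love', 'beloved', 'affection'},
--     {'hate', 'abhor', 'detest', 'loathe'},
--     {'bless', 'blessing', 'blessed'},
--     {'curse', 'cursed', 'accursed'},
--     {'peace', 'wholeness', 'completeness', 'well-being', 'prosperity'},
--     {'war', 'battle', 'fight', 'combat', 'conflict'},
--     {'king', 'ruler', 'sovereign', 'monarch'},
--     {'servant', 'slave', 'bondservant', 'minister'},
--     {'inheritance', 'heritage', 'portion', 'lot'},
--     {'land', 'earth', 'ground', 'country', 'territory'},
--     {'nation', 'people', 'tribe', 'clan'},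
--     {'mighty', 'strong', 'powerful', 'valiant'},
--     {'weak', 'feeble', 'frail'},
-- ]
--
-- def words_semantically_related(word1, word2):
--     """Check if two words are semantically related (in same synonym group)."""
--     w1, w2 = word1.lower(), word2.lower()
--     if w1 == w2:
--         return True
--     for group in SYNONYM_GROUPS:
--         if w1 in group and w2 in group:
--             return True
--     return False
-- ===== SOURCE B (Python) =====
-- # Synonym table as CSV lines; an inverted index (word -> set of group ids) is
-- # built from it once at import time, so a query is two lookups and a disjointness test.
-- _SYN_CSV = [
--     "believe, confidence, confident, faith, rely, safe, secure, security, trust, trusted, trusting",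
--     "afraid, awe, dread, fear, frightened, reverence, scared, terror",
--     "consecrated, hallowed, holiness, holy, sacred, sanctified, sanctity",
--     "agreement, bond, covenant, pact, treaty",
--     "being, life force, soul, spirit",
--     "just, justice, justifying, righteous, righteousness, upright",
--     "evil, iniquity, sinful, ungodly, unrighteous, unrighteousness, wicked, wickedness",
--     "compassion, grace, kindness, lovingkindness, loyal love, mercy",
--     "glory, honor, majesty, splendor",
--     "arrogance, haughtiness, jungle, pride, swelling, thicket",
--     "beautiful, fair, lovely, pleasant",
--     "deliver, ransom, redeem, rescue, save",
--     "atone, atonement, cover, expiate, reconcile",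
--     "offering, sacrifice, slaughter",
--     "adore, bow, prostrate, worship",
--     "convert, repent, return, turn",
--     "guilt, iniquity, sin, transgression, trespass",
--     "prophet, seer, spokesman",
--     "minister, priest",
--     "anoint, consecrate, dedicate",
--     "palace, sanctuary, temple",
--     "dwelling, tabernacle, tent",
--     "decree, judgment, justice, ordinance",
--     "commandment, instruction, law, teaching, torah",
--     "command, matter, saying, thing, word",
--     "annihilate, destroy, devastate, perish, ruin",
--     "create, fashion, form, make",
--     "affection, beloved, love",
--     "abhor, detest, hate, loathe",
--     "bless, blessed, blessing",
--     "accursed, curse, cursed",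
--     "completeness, peace, prosperity, well-being, wholeness",
--     "battle, combat, conflict, fight, war",
--     "king, monarch, ruler, sovereign",
--     "bondservant, minister, servant, slave",
--     "heritage, inheritance, lot, portion",
--     "country, earth, ground, land, territory",
--     "clan, nation, people, tribe",
--     "mighty, powerful, strong, valiant",
--     "feeble, frail, weak",
-- ]
--
-- _SYN_INDEX = {}
-- for _i, _line in enumerate(_SYN_CSV):
--     for _w in _line.split(", "):
--         _SYN_INDEX.setdefault(_w, set()).add(_i)
--
-- def words_semantically_related(word1, word2):
--     """Check if two words are semantically related (in same synonym group)."""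
--     w1, w2 = word1.lower(), word2.lower()
--     if w1 == w2:
--         return True
--     return not _SYN_INDEX.get(w1, set()).isdisjoint(_SYN_INDEX.get(w2, set()))
-- ===== Notes on version B (the rewrite author's own statement) =====
-- stated objective: alternative
-- what changed: B stores the synonym table as CSV lines and builds an inverted index (word -> set of group ids) once at import time; each query then lowercases, tests w1 == w2, and otherwise answers by a disjointness test on two index lookups instead of A's per-call scan over all 40 set literals.
import Mathlib
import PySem

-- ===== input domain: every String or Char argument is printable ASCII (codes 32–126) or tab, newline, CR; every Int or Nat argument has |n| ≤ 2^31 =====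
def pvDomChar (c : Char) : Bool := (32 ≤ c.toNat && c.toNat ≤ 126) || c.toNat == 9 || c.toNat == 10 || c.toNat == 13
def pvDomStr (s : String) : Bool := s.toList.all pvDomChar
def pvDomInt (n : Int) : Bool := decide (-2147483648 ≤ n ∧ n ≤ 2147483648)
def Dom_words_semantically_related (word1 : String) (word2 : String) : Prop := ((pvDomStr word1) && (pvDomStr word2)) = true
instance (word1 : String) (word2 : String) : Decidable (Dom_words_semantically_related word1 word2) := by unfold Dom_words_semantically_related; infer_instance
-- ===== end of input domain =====

set_option maxRecDepth 20000
set_option maxHeartbeats 4000000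

-- B replaces A's per-call scan over the 40 synonym-set literals by an inverted index (word -> set of group ids) parsed once from a CSV table and queried with a disjointness test (objective: alternative).

-- ===== PORT A =====
-- SYNONYM_GROUPS (module data of A; each Python set literal becomes a PySem.Set)
def synGroups : List (PySem.Set String) := [
  PySem.Set.ofList ["trust", "trusting", "trusted", "confident", "confidence", "secure", "security", "rely", "safe", "faith", "believe"],
  PySem.Set.ofList ["fear", "afraid", "dread", "terror", "frightened", "scared", "reverence", "awe"],
  PySem.Set.ofList ["holy", "sacred", "hallowed", "sanctified", "consecrated", "holiness", "sanctity"],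
  PySem.Set.ofList ["covenant", "agreement", "pact", "treaty", "bond"],
  PySem.Set.ofList ["soul", "spirit", "life force", "being"],
  PySem.Set.ofList ["righteous", "righteousness", "just", "upright", "justice", "justifying"],
  PySem.Set.ofList ["wicked", "wickedness", "evil", "ungodly", "sinful", "iniquity", "unrighteous", "unrighteousness"],
  PySem.Set.ofList ["mercy", "compassion", "lovingkindness", "kindness", "grace", "loyal love"],
  PySem.Set.ofList ["glory", "honor", "splendor", "majesty"],
  PySem.Set.ofList ["pride", "arrogance", "haughtiness", "swelling", "thicket", "jungle"],
  PySem.Set.ofList ["beautiful", "lovely", "fair", "pleasant"],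
  PySem.Set.ofList ["redeem", "ransom", "deliver", "rescue", "save"],
  PySem.Set.ofList ["atone", "atonement", "cover", "reconcile", "expiate"],
  PySem.Set.ofList ["sacrifice", "offering", "slaughter"],
  PySem.Set.ofList ["worship", "bow", "prostrate", "adore"],
  PySem.Set.ofList ["repent", "turn", "return", "convert"],
  PySem.Set.ofList ["sin", "transgression", "iniquity", "trespass", "guilt"],
  PySem.Set.ofList ["prophet", "seer", "spokesman"],
  PySem.Set.ofList ["priest", "minister"],
  PySem.Set.ofList ["anoint", "consecrate", "dedicate"],
  PySem.Set.ofList ["temple", "sanctuary", "palace"],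
  PySem.Set.ofList ["tabernacle", "dwelling", "tent"],
  PySem.Set.ofList ["judgment", "justice", "ordinance", "decree"],
  PySem.Set.ofList ["law", "instruction", "teaching", "torah", "commandment"],
  PySem.Set.ofList ["word", "saying", "matter", "thing", "command"],
  PySem.Set.ofList ["destroy", "annihilate", "devastate", "ruin", "perish"],
  PySem.Set.ofList ["create", "make", "form", "fashion"],
  PySem.Set.ofList ["love", "beloved", "affection"],
  PySem.Set.ofList ["hate", "abhor", "detest", "loathe"],
  PySem.Set.ofList ["bless", "blessing", "blessed"],
  PySem.Set.ofList ["curse", "cursed", "accursed"],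
  PySem.Set.ofList ["peace", "wholeness", "completeness", "well-being", "prosperity"],
  PySem.Set.ofList ["war", "battle", "fight", "combat", "conflict"],
  PySem.Set.ofList ["king", "ruler", "sovereign", "monarch"],
  PySem.Set.ofList ["servant", "slave", "bondservant", "minister"],
  PySem.Set.ofList ["inheritance", "heritage", "portion", "lot"],
  PySem.Set.ofList ["land", "earth", "ground", "country", "territory"],
  PySem.Set.ofList ["nation", "people", "tribe", "clan"],
  PySem.Set.ofList ["mighty", "strong", "powerful", "valiant"],
  PySem.Set.ofList ["weak", "feeble", "frail"]]

-- A's 'for group in SYNONYM_GROUPS: if w1 in group and w2 in group: return True'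
def wsrLoop (w1 w2 : String) : List (PySem.Set String) → Bool
  | [] => false
  | g :: rest => if PySem.Set.contains g w1 && PySem.Set.contains g w2 then true else wsrLoop w1 w2 rest

def words_semantically_related (word1 : String) (word2 : String) : Bool :=
  let w1 := PySem.Str.lower word1
  let w2 := PySem.Str.lower word2
  if w1 = w2 then true
  else wsrLoop w1 w2 synGroups

-- ===== PORT B =====
-- _SYN_CSV (module data of B: one comma-separated line per synonym group)
def synLines : List String := [
  "believe, confidence, confident, faith, rely, safe, secure, security, trust, trusted, trusting",
  "afraid, awe, dread, fear, frightened, reverence, scared, terror",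
  "consecrated, hallowed, holiness, holy, sacred, sanctified, sanctity",
  "agreement, bond, covenant, pact, treaty",
  "being, life force, soul, spirit",
  "just, justice, justifying, righteous, righteousness, upright",
  "evil, iniquity, sinful, ungodly, unrighteous, unrighteousness, wicked, wickedness",
  "compassion, grace, kindness, lovingkindness, loyal love, mercy",
  "glory, honor, majesty, splendor",
  "arrogance, haughtiness, jungle, pride, swelling, thicket",
  "beautiful, fair, lovely, pleasant",
  "deliver, ransom, redeem, rescue, save",
  "atone, atonement, cover, expiate, reconcile",
  "offering, sacrifice, slaughter",
  "adore, bow, prostrate, worship",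
  "convert, repent, return, turn",
  "guilt, iniquity, sin, transgression, trespass",
  "prophet, seer, spokesman",
  "minister, priest",
  "anoint, consecrate, dedicate",
  "palace, sanctuary, temple",
  "dwelling, tabernacle, tent",
  "decree, judgment, justice, ordinance",
  "commandment, instruction, law, teaching, torah",
  "command, matter, saying, thing, word",
  "annihilate, destroy, devastate, perish, ruin",
  "create, fashion, form, make",
  "affection, beloved, love",
  "abhor, detest, hate, loathe",
  "bless, blessed, blessing",
  "accursed, curse, cursed",
  "completeness, peace, prosperity, well-being, wholeness",
  "battle, combat, conflict, fight, war",
  "king, monarch, ruler, sovereign",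
  "bondservant, minister, servant, slave",
  "heritage, inheritance, lot, portion",
  "country, earth, ground, land, territory",
  "clan, nation, people, tribe",
  "mighty, powerful, strong, valiant",
  "feeble, frail, weak"]

-- _SYN_INDEX, built once: 'for _i, _line in enumerate(_SYN_CSV): for _w in _line.split(", "): _SYN_INDEX.setdefault(_w, set()).add(_i)'
-- (_line.split(", ") has a nonempty separator, so PySem.Str.split? is always 'some'; '.getD []' is exact here)
def synIndex : PySem.Dict String (PySem.Set Int) :=
  (PySem.List.enumerate synLines).foldl
    (fun d p => ((PySem.Str.split? p.2 ", ").getD []).foldl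
      (fun d w => d.insert w (PySem.Set.add (d.getD w PySem.Set.empty) p.1)) d)
    PySem.Dict.empty

def words_semantically_related_alt (word1 : String) (word2 : String) : Bool :=
  let w1 := PySem.Str.lower word1
  let w2 := PySem.Str.lower word2
  if w1 = w2 then true
  else !(PySem.Set.isdisjoint (synIndex.getD w1 PySem.Set.empty) (synIndex.getD w2 PySem.Set.empty))

-- ===== PRECONDITION & SPEC =====
def Spec_words_semantically_related (word1 : String) (word2 : String) (out : Bool) : Prop := out = words_semantically_related_alt word1 word2
instance (word1 : String) (word2 : String) (out : Bool) : Decidable (Spec_words_semantically_related word1 word2 out) := by unfold Spec_words_semantically_related; infer_instance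

-- ===== CLAIM (what is proved, stated in full; the proofs are below) =====
def Claim_equal_words_semantically_related : Prop := ∀ (word1 : String) (word2 : String), Dom_words_semantically_related word1 word2 → Spec_words_semantically_related word1 word2 (words_semantically_related word1 word2)

-- ===== LEMMAS AND PROOFS =====

-- the groups B's parser extracts from the CSV lines
def groupsB : List (List String) := synLines.map (fun l => (PySem.Str.split? l ", ").getD [])

-- membership in the value stored for w after folding one word list in
lemma mem_getD_addG (ws : List String) (d : PySem.Dict String (PySem.Set Int)) (i j : Int) (w : String) :
    j ∈ (ws.foldl (fun d w => d.insert w (PySem.Set.add (d.getD w PySem.Set.empty) i)) d).getD w PySem.Set.empty ↔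
      j ∈ d.getD w PySem.Set.empty ∨ (j = i ∧ w ∈ ws) := by
  induction ws generalizing d with
  | nil => simp
  | cons x xs ih =>
    simp only [List.foldl_cons] at *
    rw [ih, PySem.Dict.getD_insert]
    by_cases hwx : w = x
    · subst hwx
      simp [PySem.Set.mem_add]
      tauto
    · simp only [if_neg hwx, List.mem_cons]
      constructor
      · tauto
      · rintro (h | ⟨rfl, (rfl | hx)⟩) <;> tauto

-- membership in the value stored for w after the enumerate-fold starting at index s
lemma mem_getD_build (ls : List String) (s : Int) (d : PySem.Dict String (PySem.Set Int)) (j : Int) (w : String) :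
    j ∈ ((PySem.List.enumerate ls s).foldl
        (fun d p => ((PySem.Str.split? p.2 ", ").getD []).foldl
          (fun d w => d.insert w (PySem.Set.add (d.getD w PySem.Set.empty) p.1)) d)
        d).getD w PySem.Set.empty ↔
      j ∈ d.getD w PySem.Set.empty ∨
        ∃ k : Nat, ∃ l, ls[k]? = some l ∧ j = s + k ∧ w ∈ (PySem.Str.split? l ", ").getD [] := by
  induction ls generalizing s d with
  | nil => simp [PySem.List.enumerate_nil]
  | cons x xs ih =>
    rw [PySem.List.enumerate_cons, List.foldl_cons, ih, mem_getD_addG]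
    constructor
    · rintro ((h | ⟨rfl, hw⟩) | ⟨k, l, hk, rfl, hw⟩)
      · exact Or.inl h
      · exact Or.inr ⟨0, x, by simp, by omega, hw⟩
      · exact Or.inr ⟨k + 1, l, by simpa using hk, by push_cast; omega, hw⟩
    · rintro (h | ⟨k, l, hk, rfl, hw⟩)
      · exact Or.inl (Or.inl h)
      · cases k with
        | zero =>
          simp only [List.getElem?_cons_zero, Option.some.injEq] at hk
          exact Or.inl (Or.inr ⟨by omega, hk ▸ hw⟩)
        | succ k =>
          simp only [List.getElem?_cons_succ] at hk
          exact Or.inr ⟨k, l, hk, by push_cast; omega, hw⟩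

lemma mem_getD_synIndex (j : Int) (w : String) :
    j ∈ synIndex.getD w PySem.Set.empty ↔
      ∃ k : Nat, ∃ g, groupsB[k]? = some g ∧ j = k ∧ w ∈ g := by
  rw [synIndex, mem_getD_build]
  simp only [PySem.Dict.getD_empty, groupsB, List.getElem?_map]
  constructor
  · rintro (h | ⟨k, l, hk, rfl, hw⟩)
    · simp [PySem.Set.empty] at h
    · exact ⟨k, _, by rw [hk]; rfl, by omega, hw⟩
  · rintro ⟨k, g, hk, rfl, hw⟩
    rcases Option.map_eq_some_iff.mp hk with ⟨l, hl, rfl⟩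
    exact Or.inr ⟨k, l, hl, by omega, hw⟩

-- A's loop returns true iff some group contains both words
lemma wsrLoop_iff (w1 w2 : String) (gs : List (PySem.Set String)) :
    wsrLoop w1 w2 gs = true ↔ ∃ g ∈ gs, w1 ∈ g ∧ w2 ∈ g := by
  induction gs with
  | nil => simp [wsrLoop]
  | cons g gs ih =>
    rw [wsrLoop]
    rw [show ∀ (b : Bool), (if b = true then true else wsrLoop w1 w2 gs) =
          (b || wsrLoop w1 w2 gs) from fun b => by cases b <;> simp]
    rw [Bool.or_eq_true, Bool.and_eq_true, ih,
      PySem.Set.contains_iff g w1, PySem.Set.contains_iff g w2]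
    constructor
    · rintro (⟨h1, h2⟩ | ⟨g', hg', hw⟩)
      · exact ⟨g, List.mem_cons_self, h1, h2⟩
      · exact ⟨g', List.mem_cons_of_mem _ hg', hw⟩
    · rintro ⟨g', hg', hw1, hw2⟩
      rcases List.mem_cons.mp hg' with rfl | hmem
      · exact Or.inl ⟨hw1, hw2⟩
      · exact Or.inr ⟨g', hmem, hw1, hw2⟩

-- the parsed CSV groups and A's set literals agree index by index (computed once, by decide)
lemma groups_agree :
    groupsB.length = synGroups.length ∧
      ((groupsB.zip synGroups).all fun p =>
        p.1.all (fun w => PySem.Set.contains p.2 w) && p.2.all (fun w => p.1.contains w)) = true := by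
  decide

-- index-by-index joint membership transfer, generically
lemma mem_corr (xs : List (List String)) (ys : List (PySem.Set String))
    (hlen : xs.length = ys.length)
    (hall : ((xs.zip ys).all fun p =>
        p.1.all (fun w => PySem.Set.contains p.2 w) && p.2.all (fun w => p.1.contains w)) = true)
    (k : Nat) (w1 w2 : String) :
    (∃ g, xs[k]? = some g ∧ w1 ∈ g ∧ w2 ∈ g) ↔ (∃ s, ys[k]? = some s ∧ w1 ∈ s ∧ w2 ∈ s) := by
  induction xs generalizing ys k with
  | nil =>
    cases ys with
    | nil => simp
    | cons y ys => simp at hlen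
  | cons x xs ih =>
    cases ys with
    | nil => simp at hlen
    | cons y ys =>
      simp only [List.zip_cons_cons, List.all_cons, Bool.and_eq_true, List.all_eq_true] at hall
      obtain ⟨⟨h1, h2⟩, hrest⟩ := hall
      cases k with
      | zero =>
        simp only [List.getElem?_cons_zero, Option.some.injEq]
        constructor
        · rintro ⟨g, rfl, hw1, hw2⟩
          exact ⟨y, rfl, (PySem.Set.contains_iff y w1).mp (h1 _ hw1),
            (PySem.Set.contains_iff y w2).mp (h1 _ hw2)⟩
        · rintro ⟨s, rfl, hw1, hw2⟩
          exact ⟨x, rfl, List.contains_iff_mem.mp (h2 _ hw1), List.contains_iff_mem.mp (h2 _ hw2)⟩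
      | succ k =>
        simp only [List.getElem?_cons_succ]
        exact ih ys (by simpa using hlen) (by simpa using hrest) k
-- B's query form agrees with A's scan for every pair of (lowercased) words
lemma query_eq (w1 w2 : String) :
    wsrLoop w1 w2 synGroups =
      !(PySem.Set.isdisjoint (synIndex.getD w1 PySem.Set.empty) (synIndex.getD w2 PySem.Set.empty)) := by
  have corr := mem_corr groupsB synGroups groups_agree.1 groups_agree.2
  have key : wsrLoop w1 w2 synGroups = true ↔
      ∃ j, j ∈ synIndex.getD w1 PySem.Set.empty ∧ j ∈ synIndex.getD w2 PySem.Set.empty := by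
    rw [wsrLoop_iff]
    constructor
    · rintro ⟨g, hg, hw1, hw2⟩
      obtain ⟨k, hk⟩ := List.getElem?_of_mem hg
      obtain ⟨g', hk', hw1', hw2'⟩ := (corr k w1 w2).mpr ⟨g, hk, hw1, hw2⟩
      exact ⟨(k : Int), (mem_getD_synIndex _ _).mpr ⟨k, g', hk', rfl, hw1'⟩,
        (mem_getD_synIndex _ _).mpr ⟨k, g', hk', rfl, hw2'⟩⟩
    · rintro ⟨j, hj1, hj2⟩
      rw [mem_getD_synIndex] at hj1 hj2
      obtain ⟨k1, g1, hk1, hj1', hw1⟩ := hj1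
      obtain ⟨k2, g2, hk2, hj2', hw2⟩ := hj2
      have hk : k1 = k2 := by omega
      subst hk
      rw [hk1, Option.some.injEq] at hk2
      subst hk2
      obtain ⟨s, hs, hsw1, hsw2⟩ := (corr k1 w1 w2).mp ⟨g1, hk1, hw1, hw2⟩
      exact ⟨s, List.mem_of_getElem? hs, hsw1, hsw2⟩
  cases hb : wsrLoop w1 w2 synGroups with
  | true =>
    obtain ⟨j, hj1, hj2⟩ := key.mp hb
    have hd : PySem.Set.isdisjoint (synIndex.getD w1 PySem.Set.empty) (synIndex.getD w2 PySem.Set.empty) = false := by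
      cases h' : PySem.Set.isdisjoint (synIndex.getD w1 PySem.Set.empty) (synIndex.getD w2 PySem.Set.empty) with
      | false => rfl
      | true => exact absurd hj2 ((PySem.Set.isdisjoint_iff _ _).mp h' j hj1)
    rw [hd]; rfl
  | false =>
    have hno : ¬ ∃ j, j ∈ synIndex.getD w1 PySem.Set.empty ∧ j ∈ synIndex.getD w2 PySem.Set.empty :=
      fun hex => absurd (key.mpr hex) (by simp [hb])
    have hd : PySem.Set.isdisjoint (synIndex.getD w1 PySem.Set.empty) (synIndex.getD w2 PySem.Set.empty) = true :=
      (PySem.Set.isdisjoint_iff _ _).mpr (fun j hj1 hj2 => hno ⟨j, hj1, hj2⟩)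
    rw [hd]; rfl

-- ===== VERDICT (by name: the statement is the Claim_ definition above) =====
theorem words_semantically_related_spec : Claim_equal_words_semantically_related := by
  intro word1 word2 _
  unfold Spec_words_semantically_related words_semantically_related words_semantically_related_alt
  by_cases h : PySem.Str.lower word1 = PySem.Str.lower word2
  · simp [h]
  · simp only [h, if_false]
    exact query_eq _ _
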